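-- pv_equiv track=rewrite | github.com/sumanth9897/Machine-Learning | S20200010125_apriori.py | item_sets
-- ===== SOURCE A (Python) =====
-- def recfunction(item_sets, it_ems, ki, indeex, g):
--     if len(ki) == g:
--         item_sets.append(ki)
--     if indeex < len(it_ems) and len(ki) != g:
--         temp_ki = ki.copy()
--         ki.append(it_ems[indeex])
--         recfunction(item_sets, it_ems, ki, indeex+1, g)
--         recfunction(item_sets, it_ems, temp_ki, indeex+1, g)
--
-- def item_sets(transac,k):
--     item_sets = []
--     it_ems = set()
--     for i in range(len(transac)):
--         for j in range(len(transac[i])):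
--             it_ems.add(transac[i][j])
--     it_ems = list(it_ems)
--     it_ems.sort()
--     if k == 1:
--         for i in range(len(it_ems)):
--             it_ems[i] = [it_ems[i]]
--         return it_ems
--     if len(it_ems) < k:
--         return item_sets
--     recfunction(item_sets,it_ems,[],0,k)
--     return item_sets
-- ===== SOURCE B (Python) =====
-- def item_sets(transac, k):
--     items = sorted({x for t in transac for x in t})
--     if k < 0 or k > len(items):
--         return []
--     result = [[]]
--     for _ in range(k):
--         result = [c + [x] for c in result for x in items if not c or c[-1] < x]
--     return result
-- ===== Notes on version B (the rewrite author's own statement) =====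
-- stated objective: simpler
-- what changed: Replaces A's include/exclude index recursion with its k==1 and len<k special cases by an iterative breadth-first construction: k passes, each extending every current prefix with each strictly larger item, which yields the same lexicographic combination order.
import Mathlib
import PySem

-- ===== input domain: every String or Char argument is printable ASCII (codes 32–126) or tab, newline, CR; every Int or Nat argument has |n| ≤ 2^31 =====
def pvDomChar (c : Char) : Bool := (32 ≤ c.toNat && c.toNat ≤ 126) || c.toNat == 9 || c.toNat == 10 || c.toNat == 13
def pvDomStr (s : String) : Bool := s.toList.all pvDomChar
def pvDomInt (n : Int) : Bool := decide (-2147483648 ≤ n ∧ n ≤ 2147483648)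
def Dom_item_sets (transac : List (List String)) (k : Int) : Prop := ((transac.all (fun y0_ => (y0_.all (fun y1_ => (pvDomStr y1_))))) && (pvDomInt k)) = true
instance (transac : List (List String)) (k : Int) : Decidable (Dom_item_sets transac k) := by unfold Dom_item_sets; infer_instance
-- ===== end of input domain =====

-- B replaces A's include/exclude recursion (with its k==1 and len<k special cases) by an
-- iterative breadth-first prefix extension; same return value on every input (simpler, not faster).

-- ===== PORT A =====
-- A's helper 'recfunction': the Python mutates the accumulator list; here it is passed and returned.
def recfunctionA (acc : List (List String)) (it_ems : List String) (ki : List String)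
    (indeex : Nat) (g : Int) : List (List String) :=
  let acc := if (ki.length : Int) = g then acc ++ [ki] else acc
  if h : indeex < it_ems.length ∧ (ki.length : Int) ≠ g then
    recfunctionA (recfunctionA acc it_ems (ki ++ [it_ems[indeex]'h.1]) (indeex + 1) g)
      it_ems ki (indeex + 1) g
  else acc
termination_by it_ems.length - indeex
decreasing_by all_goals omega

def item_sets (transac : List (List String)) (k : Int) : List (List String) :=
  let item_sets0 : List (List String) := []
  -- the two index loops adding every transac[i][j] to the set
  let it_ems : PySem.Set String :=
    transac.foldl (fun s row => row.foldl PySem.Set.add s) PySem.Set.empty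
  -- it_ems = list(it_ems); it_ems.sort()  (sort without key: order-independent consumption of the set)
  let it_ems : List String := PySem.List.sorted it_ems (fun x => x) false
  if k = 1 then it_ems.map (fun x => [x])
  else if (it_ems.length : Int) < k then item_sets0
  else recfunctionA item_sets0 it_ems [] 0 k

-- ===== PORT B =====
-- one extension pass: [c + [x] for c in result for x in items if not c or c[-1] < x]
def pvStepB (items : List String) (result : List (List String)) : List (List String) :=
  result.flatMap (fun c =>
    (items.filter (fun x => c = [] || decide (PySem.List.pyGetD c (-1) "" < x))).map
      (fun x => c ++ [x]))

def item_sets_alt (transac : List (List String)) (k : Int) : List (List String) :=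
  let items := PySem.List.sorted (PySem.Set.ofList transac.flatten) (fun x => x) false
  if k < 0 ∨ (items.length : Int) < k then []
  else (List.range k.toNat).foldl (fun result _ => pvStepB items result) [[]]

-- ===== PRECONDITION & SPEC =====
def Spec_item_sets (transac : List (List String)) (k : Int) (out : List (List String)) : Prop := out = item_sets_alt transac k
instance (transac : List (List String)) (k : Int) (out : List (List String)) : Decidable (Spec_item_sets transac k out) := by unfold Spec_item_sets; infer_instance

-- ===== CLAIM (what is proved, stated in full; the proofs are below) =====
def Claim_equal_item_sets : Prop := ∀ (transac : List (List String)) (k : Int), Dom_item_sets transac k → Spec_item_sets transac k (item_sets transac k)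

-- ===== LEMMAS AND PROOFS =====

-- the combinations of xs of size r, in lexicographic order (proof-only characterisation)
def pvCombos : Nat → List String → List (List String)
  | 0, _ => [[]]
  | _ + 1, [] => []
  | r + 1, x :: xs => (pvCombos r xs).map (x :: ·) ++ pvCombos (r + 1) xs

theorem pvCombos_one (xs : List String) : pvCombos 1 xs = xs.map (fun x => [x]) := by
  induction xs with
  | nil => rfl
  | cons x xs ih => simp [pvCombos, ih]

theorem pvCombos_mem_subset (r : Nat) (xs : List String) (c : List String)
    (hc : c ∈ pvCombos r xs) : ∀ a ∈ c, a ∈ xs := by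
  induction xs generalizing r c with
  | nil =>
    cases r with
    | zero => simp [pvCombos] at hc; simp [hc]
    | succ r => simp [pvCombos] at hc
  | cons x xs ih =>
    cases r with
    | zero => simp [pvCombos] at hc; simp [hc]
    | succ r =>
      simp only [pvCombos, List.mem_append, List.mem_map] at hc
      rcases hc with ⟨c', hc', rfl⟩ | hc
      · intro a ha
        rcases List.mem_cons.mp ha with rfl | ha
        · simp
        · exact List.mem_cons_of_mem _ (ih r c' hc' a ha)
      · intro a ha; exact List.mem_cons_of_mem _ (ih (r + 1) c hc a ha)

theorem pvCombos_ne_nil (r : Nat) (xs : List String) (c : List String)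
    (hc : c ∈ pvCombos (r + 1) xs) : c ≠ [] := by
  induction xs generalizing r c with
  | nil => simp [pvCombos] at hc
  | cons x xs ih =>
    simp only [pvCombos, List.mem_append, List.mem_map] at hc
    rcases hc with ⟨c', _, rfl⟩ | hc
    · simp
    · exact ih r c hc

-- the B-side predicate, on a nonempty combination, only looks at the last element
theorem pvPred_cons (y : String) (c : List String) (hc : c ≠ []) (x : String) :
    ((y :: c = []) || decide (PySem.List.pyGetD (y :: c) (-1) "" < x))
      = ((c = []) || decide (PySem.List.pyGetD c (-1) "" < x)) := by
  rw [PySem.List.pyGetD_neg_one (y :: c) "" (by simp), PySem.List.pyGetD_neg_one c "" hc]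
  simp [List.getLast_cons hc, hc]

-- key commutation: one extension pass over the size-t combinations of a strictly
-- increasing list gives the size-(t+1) combinations, in order
theorem pvStepB_combos (ys : List String) (hys : ys.Pairwise (· < ·)) (t : Nat) :
    pvStepB ys (pvCombos t ys) = pvCombos (t + 1) ys := by
  induction ys generalizing t with
  | nil =>
    cases t with
    | zero => simp [pvStepB, pvCombos]
    | succ t => simp [pvStepB, pvCombos]
  | cons y ys ih =>
    have hy : ∀ a ∈ ys, y < a := fun a ha => (List.pairwise_cons.mp hys).1 a ha
    have hys' : ys.Pairwise (· < ·) := (List.pairwise_cons.mp hys).2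
    cases t with
    | zero =>
      -- extending [[]]: every item qualifies
      simp only [pvStepB, pvCombos, List.flatMap_cons, List.flatMap_nil, List.append_nil]
      simp [pvCombos_one]
    | succ t =>
      -- pvCombos (t+1) (y::ys) = map (y::·) (pvCombos t ys) ++ pvCombos (t+1) ys
      simp only [pvCombos, pvStepB, List.flatMap_append]
      -- the filter over y::ys never keeps y for a combination drawn from ys-world
      have hfilter : ∀ c : List String, (∀ a ∈ c, a ∈ ys) → c ≠ [] →
          (y :: ys).filter (fun x => c = [] || decide (PySem.List.pyGetD c (-1) "" < x))
            = ys.filter (fun x => c = [] || decide (PySem.List.pyGetD c (-1) "" < x)) := by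
        intro c hsub hne
        rw [List.filter_cons]
        have hlast : c.getLast hne ∈ ys := hsub _ (List.getLast_mem hne)
        have : ¬ (PySem.List.pyGetD c (-1) "" < y) := by
          rw [PySem.List.pyGetD_neg_one c "" hne]
          exact not_lt_of_gt (hy _ hlast)
        simp [hne, this]
      have part2 : (pvCombos (t + 1) ys).flatMap (fun c =>
          ((y :: ys).filter (fun x => c = [] || decide (PySem.List.pyGetD c (-1) "" < x))).map
            (fun x => c ++ [x])) = pvCombos (t + 2) ys := by
        rw [← ih hys' (t + 1)]
        simp only [pvStepB]
        apply List.flatMap_congr  -- congruence over members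
        intro c hc
        rw [hfilter c (pvCombos_mem_subset _ _ _ hc) (pvCombos_ne_nil _ _ _ hc)]
      have part1 : ((pvCombos t ys).map (y :: ·)).flatMap (fun c =>
          ((y :: ys).filter (fun x => c = [] || decide (PySem.List.pyGetD c (-1) "" < x))).map
            (fun x => c ++ [x]))
          = (pvCombos (t + 1) ys).map (y :: ·) := by
        rw [← ih hys' t]
        simp only [pvStepB, List.flatMap_map, List.map_flatMap]
        apply List.flatMap_congr
        intro c hc
        have hsub : ∀ a ∈ c, a ∈ ys := pvCombos_mem_subset _ _ _ hc
        by_cases hne : c = []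
        · subst hne
          -- extending the singleton prefix [y]: the kept items are exactly ys
          have hgl : PySem.List.pyGetD (y :: ([] : List String)) (-1) "" = y := by
            rw [PySem.List.pyGetD_neg_one (y :: ([] : List String)) "" (by simp)]; rfl
          have hyy : ¬ (y < y) := lt_irrefl y
          have h1 : (y :: ys).filter
              (fun x => (y :: ([] : List String)) = [] || decide (PySem.List.pyGetD (y :: ([] : List String)) (-1) "" < x)) = ys := by
            rw [List.filter_cons]
            rw [List.filter_eq_self.mpr (fun a ha => by simp [hgl, hy a ha])]
            simp [hgl]
          rw [h1]
          rw [List.filter_eq_self.mpr (fun (a : String) (ha : a ∈ ys) => by simp : ∀ a ∈ ys,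
            ((([] : List String) = [] : Bool) || decide (PySem.List.pyGetD ([] : List String) (-1) "" < a)) = true)]
          simp
        · have hcons : ∀ x, ((y :: c = []) || decide (PySem.List.pyGetD (y :: c) (-1) "" < x))
              = ((c = []) || decide (PySem.List.pyGetD c (-1) "" < x)) := pvPred_cons y c hne
          have : (y :: ys).filter (fun x => (y :: c = []) || decide (PySem.List.pyGetD (y :: c) (-1) "" < x))
              = ys.filter (fun x => (c = []) || decide (PySem.List.pyGetD c (-1) "" < x)) := by
            rw [List.filter_congr (fun x _ => hcons x)]
            exact hfilter c hsub hne
          rw [this]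
          simp [List.map_map, Function.comp]
      rw [part1, part2]

-- B's fold of extension passes computes pvCombos
theorem pvAlt_eq_combos (items : List String) (hit : items.Pairwise (· < ·)) (m : Nat) :
    (List.range m).foldl (fun result _ => pvStepB items result) [[]] = pvCombos m items := by
  induction m with
  | zero => simp [pvCombos]
  | succ m ih => rw [List.range_succ, List.foldl_append, ih]; simp [pvStepB_combos items hit m]

-- A's recursion never appends anything for a negative target size
theorem recA_neg (it_ems : List String) (g : Int) (hg : g < 0) :
    ∀ m idx ki acc, it_ems.length - idx ≤ m →
      recfunctionA acc it_ems ki idx g = acc := by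
  intro m
  induction m with
  | zero =>
    intro idx ki acc hm
    rw [recfunctionA]
    have h1 : ¬ ((ki.length : Int) = g) := by omega
    have h3 : ¬ idx < it_ems.length := by omega
    simp [h1, h3]
  | succ m ih =>
    intro idx ki acc hm
    rw [recfunctionA]
    have h1 : ¬ ((ki.length : Int) = g) := by omega
    by_cases h2 : idx < it_ems.length ∧ (ki.length : Int) ≠ g
    · simp only [if_neg h1, dif_pos h2]
      rw [ih (idx + 1) _ _ (by omega), ih (idx + 1) _ _ (by omega)]
    · simp only [if_neg h1, dif_neg h2]

-- A's recursion computes, in order, all extensions of ki by n further items drawn from drop idx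
theorem recA_eq (it_ems : List String) :
    ∀ m idx (ki : List String) (acc : List (List String)) (n : Nat), it_ems.length - idx ≤ m →
      recfunctionA acc it_ems ki idx ((ki.length : Int) + (n : Int))
        = acc ++ (pvCombos n (it_ems.drop idx)).map (ki ++ ·) := by
  intro m
  induction m with
  | zero =>
    intro idx ki acc n hm
    rw [recfunctionA]
    cases n with
    | zero =>
      simp [pvCombos]
    | succ n =>
      have h1 : ¬ ((ki.length : Int) = (ki.length : Int) + ((n + 1 : Nat) : Int)) := by
        push_cast; omega
      have h3 : ¬ idx < it_ems.length := by omega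
      have hdrop : it_ems.drop idx = [] := List.drop_eq_nil_of_le (by omega)
      simp [h3, hdrop, pvCombos]
      omega
  | succ m ih =>
    intro idx ki acc n hm
    rw [recfunctionA]
    cases n with
    | zero =>
      simp [pvCombos]
    | succ n =>
      have h1 : ¬ ((ki.length : Int) = (ki.length : Int) + ((n + 1 : Nat) : Int)) := by
        push_cast; omega
      by_cases h4 : idx < it_ems.length
      · have h2 : idx < it_ems.length ∧ (ki.length : Int) ≠ (ki.length : Int) + ((n + 1 : Nat) : Int) :=
          ⟨h4, h1⟩
        simp only [if_neg h1, dif_pos h2]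
        have hg : (ki.length : Int) + ((n + 1 : Nat) : Int)
            = (((ki ++ [it_ems[idx]'h4]).length : Int)) + (n : Int) := by
          simp; omega
        have inner : recfunctionA acc it_ems (ki ++ [it_ems[idx]'h4]) (idx + 1)
            ((ki.length : Int) + ((n + 1 : Nat) : Int))
            = acc ++ (pvCombos n (it_ems.drop (idx + 1))).map ((ki ++ [it_ems[idx]'h4]) ++ ·) := by
          rw [hg]; exact ih (idx + 1) _ acc n (by omega)
        rw [inner, ih (idx + 1) ki _ (n + 1) (by omega)]
        rw [List.drop_eq_getElem_cons h4]
        simp [pvCombos, List.map_map, Function.comp_def, List.append_assoc]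
      · have h2 : ¬ (idx < it_ems.length ∧ (ki.length : Int) ≠ (ki.length : Int) + ((n + 1 : Nat) : Int)) := by
          tauto
        have hdrop : it_ems.drop idx = [] := List.drop_eq_nil_of_le (by omega)
        simp only [if_neg h1, dif_neg h2]
        simp [hdrop, pvCombos]

-- ===== VERDICT (by name: the statement is the Claim_ definition above) =====
theorem item_sets_spec : Claim_equal_item_sets := by
  unfold Claim_equal_item_sets Spec_item_sets
  intro transac k _
  unfold item_sets item_sets_alt
  simp only []
  have hset : transac.foldl (fun s row => row.foldl PySem.Set.add s) PySem.Set.empty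
      = PySem.Set.ofList transac.flatten := by
    rw [PySem.Set.ofList_eq_foldl, List.foldl_flatten]
    rfl
  rw [hset]
  set items := PySem.List.sorted (PySem.Set.ofList transac.flatten) (fun x => x) false with hitems
  have hit : items.Pairwise (· < ·) := PySem.List.sorted_ofList_pairwise_lt transac.flatten
  by_cases hkneg : k < 0
  · rw [if_neg (by omega : ¬ k = 1), if_neg (by omega : ¬ ((items.length : Int) < k)),
      if_pos (Or.inl hkneg)]
    exact recA_neg items k hkneg items.length 0 [] [] (by omega)
  · by_cases hlen : (items.length : Int) < k
    · rw [if_pos (Or.inr hlen)]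
      by_cases hk1 : k = 1
      · subst hk1
        have hnil : items = [] := List.eq_nil_of_length_eq_zero (by omega)
        rw [if_pos rfl, hnil]
        rfl
      · rw [if_neg hk1, if_pos hlen]
    · by_cases hk1 : k = 1
      · subst hk1
        rw [if_pos rfl,
          if_neg (show ¬ ((1 : Int) < 0 ∨ (items.length : Int) < 1) from fun h => h.elim hkneg hlen),
          pvAlt_eq_combos items hit (1 : Int).toNat,
          show (1 : Int).toNat = 1 from rfl, pvCombos_one]
      · rw [if_neg hk1, if_neg hlen,
          if_neg (show ¬ (k < 0 ∨ (items.length : Int) < k) from fun h => h.elim hkneg hlen),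
          pvAlt_eq_combos items hit k.toNat]
        have hk : k = ((([] : List String).length : Int)) + (k.toNat : Int) := by
          simp; omega
        have hrec : recfunctionA [] items [] 0 k
            = [] ++ (pvCombos k.toNat (items.drop 0)).map (([] : List String) ++ ·) := by
          conv_lhs => rw [hk]
          exact recA_eq items items.length 0 [] [] k.toNat (by omega)
        rw [hrec]
        simp
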